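-- pv_equiv track=rewrite | github.com/ConnerMcCarthy/bases | src/numbases/bases.py | to_base_parenthesized
-- ===== SOURCE A (Python) =====
-- DIGITS = "0123456789ABCDEFGHIJKLMNOPQRSTUVWXYZ"
--
-- def to_base_parenthesized(n: int, base: int) -> str:
--     """Convert an integer and render digits >= 10 as parenthesized numbers."""
--     if not isinstance(n, int):
--         raise TypeError("n must be an int")
--     if not isinstance(base, int):
--         raise TypeError("base must be an int")
--     if base < 2 or base > len(DIGITS):
--         raise ValueError(f"base must be between 2 and {len(DIGITS)}")
--
--     if n == 0:
--         return "0"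
--
--     negative = n < 0
--     n = abs(n)
--     tokens = []
--     while n > 0:
--         n, rem = divmod(n, base)
--         if rem < 10:
--             tokens.append(str(rem))
--         else:
--             tokens.append(f"({rem})")
--
--     rendered = "".join(reversed(tokens))
--     return f"-{rendered}" if negative else rendered
-- ===== SOURCE B (Python) =====
-- DIGITS = "0123456789ABCDEFGHIJKLMNOPQRSTUVWXYZ"
--
-- def to_base_parenthesized(n: int, base: int) -> str:
--     """Convert an integer and render digits >= 10 as parenthesized numbers."""
--     if not isinstance(n, int):
--         raise TypeError("n must be an int")
--     if not isinstance(base, int):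
--         raise TypeError("base must be an int")
--     if base < 2 or base > len(DIGITS):
--         raise ValueError(f"base must be between 2 and {len(DIGITS)}")
--
--     if n == 0:
--         return "0"
--
--     m = abs(n)
--     # largest power of base not exceeding m
--     p = 1
--     while p * base <= m:
--         p *= base
--     # peel digits most-significant-first by dividing by descending powers
--     out = "-" if n < 0 else ""
--     while p > 0:
--         d = m // p
--         out += str(d) if d < 10 else "(" + str(d) + ")"
--         m %= p
--         p //= base
--     return out
-- ===== Notes on version B (the rewrite author's own statement) =====
-- stated objective: alternative
-- what changed: B emits digits most-significant-first: it first finds the largest power of the base not exceeding |n| and then peels off leading digits by division by descending powers, instead of A's least-significant-first remainder loop that appends tokens to a list and reverses/joins it at the end.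
import Mathlib
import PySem

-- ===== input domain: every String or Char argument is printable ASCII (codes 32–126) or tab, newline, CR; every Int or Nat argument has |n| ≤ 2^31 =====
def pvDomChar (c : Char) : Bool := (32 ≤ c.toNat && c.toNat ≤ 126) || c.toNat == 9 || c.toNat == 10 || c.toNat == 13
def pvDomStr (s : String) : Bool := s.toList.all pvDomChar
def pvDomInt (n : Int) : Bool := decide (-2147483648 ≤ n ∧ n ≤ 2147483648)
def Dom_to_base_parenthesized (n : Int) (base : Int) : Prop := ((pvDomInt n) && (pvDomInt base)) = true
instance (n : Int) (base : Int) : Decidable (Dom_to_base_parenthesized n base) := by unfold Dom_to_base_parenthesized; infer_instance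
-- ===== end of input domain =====

-- B replaces A's least-significant-first token loop + reversal by a most-significant-first
-- digit extraction via descending powers of the base; objective: alternative (same cost).

-- ===== PORT A =====
-- digit token: str(rem) for rem < 10, else "(rem)"; rem is nonnegative here
def pvTok (rem : Int) : String :=
  if rem < 10 then PySem.Int.toStr rem else "(" ++ PySem.Int.toStr rem ++ ")"

-- the while loop: n, rem = divmod(n, base); tokens.append(...). Since n ≥ 0 and
-- base ≥ 2 here, Python's divmod coincides with Nat division (exact on this domain).
def pvLoopA (base : Int) (m : Nat) (tokens : List String) : List String :=
  if m = 0 ∨ base < 2 then tokens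
  else pvLoopA base (m / base.toNat) (tokens ++ [pvTok (m % base.toNat)])
termination_by m
decreasing_by
  rename_i h
  push Not at h
  exact Nat.div_lt_self (Nat.pos_of_ne_zero h.1) (by omega)

def to_base_parenthesized (n : Int) (base : Int) : String :=
  -- base out of range: Python raises ValueError (excluded by Pre_); port returns ""
  if base < 2 ∨ base > 36 then ""
  else if n = 0 then "0"
  else
    let negative := n < 0
    let tokens := pvLoopA base n.natAbs []
    let rendered := String.join tokens.reverse
    if negative then "-" ++ rendered else rendered

-- ===== PORT B =====
-- out += str(d) if d < 10 else "(" + str(d) + ")"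
def pvTokB (d : Nat) : String :=
  if d < 10 then PySem.Int.toStr d else "(" ++ PySem.Int.toStr d ++ ")"

-- while p * base <= m: p *= base   (guard '2 ≤ b ∧ 1 ≤ p' only makes recursion total;
-- it holds on every call B makes)
def pvPowB (b m p : Nat) : Nat :=
  if 2 ≤ b ∧ 1 ≤ p ∧ p * b ≤ m then pvPowB b m (p * b) else p
termination_by m - p
decreasing_by
  rename_i h
  have h2 : p * 2 ≤ p * b := Nat.mul_le_mul_left p h.1
  omega

-- while p > 0: d = m // p; out += token(d); m %= p; p //= base
-- (guard 'b < 2' only makes recursion total; B always calls with b ≥ 2)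
def pvLoopB (b p m : Nat) : String :=
  if p = 0 ∨ b < 2 then ""
  else pvTokB (m / p) ++ pvLoopB b (p / b) (m % p)
termination_by p
decreasing_by
  rename_i h
  push Not at h
  exact Nat.div_lt_self (Nat.pos_of_ne_zero h.1) (by omega)

def to_base_parenthesized_alt (n : Int) (base : Int) : String :=
  -- base out of range: Python raises ValueError (excluded by Pre_); port returns ""
  if base < 2 ∨ base > 36 then ""
  else if n = 0 then "0"
  else
    let m := n.natAbs
    let p := pvPowB base.toNat m 1
    (if n < 0 then "-" else "") ++ pvLoopB base.toNat p m

-- ===== PRECONDITION & SPEC =====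
-- Pre_ excludes exactly the inputs on which A raises ValueError (base outside 2..36).
def Pre_to_base_parenthesized (n : Int) (base : Int) : Prop := 2 ≤ base ∧ base ≤ 36
instance (n : Int) (base : Int) : Decidable (Pre_to_base_parenthesized n base) := by
  unfold Pre_to_base_parenthesized; infer_instance

def pvWitness_to_base_parenthesized : Int × Int := (-500, 16)

def Spec_to_base_parenthesized (n : Int) (base : Int) (out : String) : Prop := out = to_base_parenthesized_alt n base
instance (n : Int) (base : Int) (out : String) : Decidable (Spec_to_base_parenthesized n base out) := by unfold Spec_to_base_parenthesized; infer_instance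

-- ===== CLAIM (what is proved, stated in full; the proofs are below) =====
def Claim_equal_to_base_parenthesized : Prop := ∀ (n : Int) (base : Int), Dom_to_base_parenthesized n base → Pre_to_base_parenthesized n base → Spec_to_base_parenthesized n base (to_base_parenthesized n base)

-- ===== LEMMAS AND PROOFS =====

-- proof-only helper: the least-significant-first recursion both sides are related to
def pvRender (base : Int) (m : Nat) : String :=
  if m = 0 ∨ base < 2 then ""
  else pvRender base (m / base.toNat) ++ pvTok (m % base.toNat)
termination_by m
decreasing_by
  rename_i h
  push Not at h
  exact Nat.div_lt_self (Nat.pos_of_ne_zero h.1) (by omega)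

lemma pvTokB_eq (d : Nat) : pvTokB d = pvTok (d : Int) := by
  unfold pvTokB pvTok
  by_cases h : d < 10
  · rw [if_pos h, if_pos (by exact_mod_cast h)]
  · rw [if_neg h, if_neg (by exact_mod_cast h)]

-- A's loop, joined and reversed, is the LSD-first recursion
lemma pvLoopA_join (base : Int) (m : Nat) :
    ∀ (tokens : List String),
      String.join (pvLoopA base m tokens).reverse
        = pvRender base m ++ String.join tokens.reverse := by
  induction m using Nat.strong_induction_on with
  | _ m ih =>
    intro tokens
    rw [pvLoopA, pvRender]
    split_ifs with h
    · simp
    · push Not at h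
      rw [ih (m / base.toNat) (Nat.div_lt_self (Nat.pos_of_ne_zero h.1) (by omega))]
      simp [← String.toList_inj, String.toList_append]

-- pvLoopB at p = 1 emits a single token
lemma pvLoopB_one (b : Nat) (hb : 2 ≤ b) (x : Nat) : pvLoopB b 1 x = pvTokB x := by
  rw [pvLoopB, if_neg (by omega), Nat.div_one, Nat.div_eq_of_lt (by omega), pvLoopB]
  simp

-- peeling one more power off the front is one LSD step at the back
lemma pvLoopB_succ (b : Nat) (hb : 2 ≤ b) :
    ∀ (k m : Nat), pvLoopB b (b ^ (k + 1)) m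
      = pvLoopB b (b ^ k) (m / b) ++ pvTokB (m % b) := by
  intro k
  have hb0 : 0 < b := by omega
  induction k with
  | zero =>
    intro m
    rw [pow_one, pow_zero, pvLoopB, if_neg (by omega), Nat.div_self hb0,
      pvLoopB_one b hb, pvLoopB_one b hb]
  | succ k ih =>
    intro m
    have hp2 : 0 < b ^ (k + 1 + 1) := Nat.pow_pos hb0
    have hp1 : 0 < b ^ (k + 1) := Nat.pow_pos hb0
    conv_lhs => rw [pvLoopB]
    rw [if_neg (by omega)]
    have hdiv : b ^ (k + 1 + 1) / b = b ^ (k + 1) := by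
      rw [pow_succ, Nat.mul_div_cancel _ hb0]
    rw [hdiv, ih]
    conv_rhs => rw [pvLoopB]
    rw [if_neg (by omega)]
    have hdiv2 : b ^ (k + 1) / b = b ^ k := by
      rw [pow_succ, Nat.mul_div_cancel _ hb0]
    have e1 : m / b / b ^ (k + 1) = m / b ^ (k + 1 + 1) := by
      rw [Nat.div_div_eq_div_mul, ← pow_succ']
    have e2 : m % b ^ (k + 1 + 1) / b = m / b % b ^ (k + 1) := by
      rw [pow_succ', Nat.mod_mul_right_div_self]
    have e3 : m % b ^ (k + 1 + 1) % b = m % b :=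
      Nat.mod_mod_of_dvd m (dvd_pow_self b (Nat.succ_ne_zero _))
    rw [hdiv2, e1, e2, e3]
    simp [← String.toList_inj, String.toList_append]

-- B's MSD loop started at the right power equals the LSD recursion
lemma pvLoopB_render (base : Int) (hb : 2 ≤ base) :
    ∀ (k m : Nat), base.toNat ^ k ≤ m → m < base.toNat ^ (k + 1) →
      pvLoopB base.toNat (base.toNat ^ k) m = pvRender base m := by
  have hbn : 2 ≤ base.toNat := by omega
  have hb0 : 0 < base.toNat := by omega
  intro k
  induction k with
  | zero =>
    intro m hlo hhi
    rw [pow_zero] at hlo ⊢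
    rw [pow_one] at hhi
    rw [pvLoopB_one _ hbn, pvRender, if_neg (by omega), Nat.div_eq_of_lt hhi,
      show pvRender base 0 = "" from by rw [pvRender]; simp,
      show ((m : Int) % ((base.toNat : Nat) : Int)) = (m : Int) from by
        rw [← Int.natCast_mod, Nat.mod_eq_of_lt hhi],
      pvTokB_eq]
    simp
  | succ k ih =>
    intro m hlo hhi
    have h1 : base.toNat ^ k ≤ m / base.toNat := by
      rw [Nat.le_div_iff_mul_le hb0, ← pow_succ]
      exact hlo
    have h2 : m / base.toNat < base.toNat ^ (k + 1) := by
      rw [Nat.div_lt_iff_lt_mul hb0, ← pow_succ]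
      exact hhi
    have hm : m ≠ 0 := by
      have hp : 0 < base.toNat ^ (k + 1) := Nat.pow_pos hb0
      omega
    rw [pvLoopB_succ _ hbn, ih _ h1 h2]
    conv_rhs => rw [pvRender]
    rw [if_neg (by omega), pvTokB_eq, Int.natCast_mod]

-- pvPowB finds a power b^j with b^j ≤ m < b^(j+1)
lemma pvPowB_spec (b m : Nat) (hb : 2 ≤ b) :
    ∀ (fuel p k : Nat), m - p ≤ fuel → p = b ^ k → p ≤ m →
      ∃ j, pvPowB b m p = b ^ j ∧ b ^ j ≤ m ∧ m < b ^ (j + 1) := by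
  intro fuel
  induction fuel with
  | zero =>
    intro p k hf hpk hpm
    have hp1 : 0 < p := hpk ▸ Nat.pow_pos (by omega)
    have h2 : p * 2 ≤ p * b := Nat.mul_le_mul_left p hb
    rw [pvPowB, if_neg (by omega)]
    exact ⟨k, hpk, by rw [← hpk]; exact hpm, by rw [pow_succ, ← hpk]; omega⟩
  | succ fuel ih =>
    intro p k hf hpk hpm
    have hp1 : 0 < p := hpk ▸ Nat.pow_pos (by omega)
    have h2 : p * 2 ≤ p * b := Nat.mul_le_mul_left p hb
    rw [pvPowB]
    by_cases hc : p * b ≤ m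
    · rw [if_pos ⟨hb, hp1, hc⟩]
      exact ih (p * b) (k + 1) (by omega) (by rw [pow_succ, hpk]) hc
    · rw [if_neg (by omega)]
      exact ⟨k, hpk, by rw [← hpk]; exact hpm, by rw [pow_succ, ← hpk]; omega⟩

-- ===== VERDICT (by name: the statement is the Claim_ definition above) =====
theorem to_base_parenthesized_spec : Claim_equal_to_base_parenthesized := by
  intro n base _ hpre
  unfold Spec_to_base_parenthesized to_base_parenthesized to_base_parenthesized_alt
  obtain ⟨h2, h36⟩ := hpre
  rw [if_neg (show ¬(base < 2 ∨ base > 36) by omega),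
    if_neg (show ¬(base < 2 ∨ base > 36) by omega)]
  by_cases h0 : n = 0
  · rw [if_pos h0, if_pos h0]
  · rw [if_neg h0, if_neg h0]
    have hm : 1 ≤ n.natAbs := by
      have := Int.natAbs_pos.mpr h0
      omega
    obtain ⟨j, hpow, hlo, hhi⟩ := pvPowB_spec base.toNat n.natAbs (by omega)
      n.natAbs 1 0 (by omega) (by rw [pow_zero]) hm
    have hA : String.join (pvLoopA base n.natAbs []).reverse = pvRender base n.natAbs := by
      rw [pvLoopA_join]
      simp [← String.toList_inj, String.toList_append]
    simp only [hpow, pvLoopB_render base h2 j n.natAbs hlo hhi]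
    by_cases hneg : n < 0
    · rw [if_pos hneg, if_pos hneg, hA]
    · rw [if_neg hneg, if_neg hneg, hA]
      simp
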